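-- pv_equiv track=rewrite | github.com/hongyixiong/NQueensProblem | src/nqueens_test.py | get_num_conflict_at_square
-- ===== SOURCE A (Python) =====
-- def get_num_conflict_at_square(row1, col1, solution):
--     num_conflict_at_square = 0
--     for row2 in range(0, len(solution)):
--         if row1 != row2:
--             col2 = solution[row2]
--             if has_conflict(row1, col1, row2, col2):
--                 num_conflict_at_square += 1
--     return num_conflict_at_square
--
-- def has_conflict(row1, col1, row2, col2):
--     return (row1 == row2) or (col1 == col2) or (row1 - col1 == row2 - col2) or (row1 + col1 == row2 + col2)
-- ===== SOURCE B (Python) =====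
-- def get_num_conflict_at_square(row1, col1, solution):
--     same_col = sum(1 for r, c in enumerate(solution) if r != row1 and c == col1)
--     same_diag = sum(1 for r, c in enumerate(solution) if r != row1 and r - c == row1 - col1)
--     same_anti = sum(1 for r, c in enumerate(solution) if r != row1 and r + c == row1 + col1)
--     return same_col + same_diag + same_anti
-- ===== Notes on version B (the rewrite author's own statement) =====
-- stated objective: alternative
-- what changed: Replaces the indexed loop calling has_conflict with three independent category counts over enumerate(solution) (same column, same main diagonal, same anti-diagonal), summed; the counts are disjoint given r != row1, so the sum equals A's count.
import Mathlib
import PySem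

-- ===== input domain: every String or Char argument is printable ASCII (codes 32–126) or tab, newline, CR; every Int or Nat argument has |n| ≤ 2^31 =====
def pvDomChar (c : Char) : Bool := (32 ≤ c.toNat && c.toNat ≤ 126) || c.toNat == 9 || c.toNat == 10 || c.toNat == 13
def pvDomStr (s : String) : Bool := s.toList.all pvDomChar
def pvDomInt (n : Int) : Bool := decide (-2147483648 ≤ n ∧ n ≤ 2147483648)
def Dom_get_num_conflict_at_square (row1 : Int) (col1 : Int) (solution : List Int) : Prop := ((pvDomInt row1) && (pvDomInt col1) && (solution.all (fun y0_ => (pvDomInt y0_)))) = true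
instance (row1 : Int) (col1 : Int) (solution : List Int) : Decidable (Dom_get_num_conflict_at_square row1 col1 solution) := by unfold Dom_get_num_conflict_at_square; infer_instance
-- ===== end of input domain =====

-- B replaces the indexed loop with three disjoint category counts (same column / main diagonal /
-- anti-diagonal) over enumerate(solution), summed — an alternative decomposition of equal cost.


-- ===== PORT A =====
def has_conflict (row1 : Int) (col1 : Int) (row2 : Int) (col2 : Int) : Bool :=
  (row1 == row2) || (col1 == col2) || (row1 - col1 == row2 - col2) || (row1 + col1 == row2 + col2)

def get_num_conflict_at_square (row1 : Int) (col1 : Int) (solution : List Int) : Int :=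
  (PySem.List.pyRange 0 (solution.length : Int) 1).foldl
    (fun acc row2 =>
      if row1 ≠ row2 then
        -- row2 ∈ range(len(solution)), so the index is always in range: pyGetD is exact here
        if has_conflict row1 col1 row2 (PySem.List.pyGetD solution row2 0) then acc + 1 else acc
      else acc) 0

-- ===== PORT B =====
def get_num_conflict_at_square_alt (row1 : Int) (col1 : Int) (solution : List Int) : Int :=
  ((PySem.List.enumerate solution 0).countP (fun p => p.1 != row1 && p.2 == col1) : Int)
  + ((PySem.List.enumerate solution 0).countP (fun p => p.1 != row1 && p.1 - p.2 == row1 - col1) : Int)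
  + ((PySem.List.enumerate solution 0).countP (fun p => p.1 != row1 && p.1 + p.2 == row1 + col1) : Int)

-- ===== PRECONDITION & SPEC =====
def Spec_get_num_conflict_at_square (row1 : Int) (col1 : Int) (solution : List Int) (out : Int) : Prop := out = get_num_conflict_at_square_alt row1 col1 solution
instance (row1 : Int) (col1 : Int) (solution : List Int) (out : Int) : Decidable (Spec_get_num_conflict_at_square row1 col1 solution out) := by unfold Spec_get_num_conflict_at_square; infer_instance

-- ===== CLAIM (what is proved, stated in full; the proofs are below) =====
def Claim_equal_get_num_conflict_at_square : Prop := ∀ (row1 : Int) (col1 : Int) (solution : List Int), Dom_get_num_conflict_at_square row1 col1 solution → Spec_get_num_conflict_at_square row1 col1 solution (get_num_conflict_at_square row1 col1 solution)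

-- ===== LEMMAS AND PROOFS =====

-- The guarded conflict test splits as a Nat sum of the three disjoint category indicators.
theorem pv_pointwise (row1 col1 : Int) (p : Int × Int) :
    (if (decide (row1 ≠ p.1) && has_conflict row1 col1 p.1 p.2) = true then 1 else 0 : Nat)
      = (if (p.1 != row1 && p.2 == col1) = true then 1 else 0)
        + (if (p.1 != row1 && p.1 - p.2 == row1 - col1) = true then 1 else 0)
        + (if (p.1 != row1 && p.1 + p.2 == row1 + col1) = true then 1 else 0) := by
  simp only [has_conflict, Bool.and_eq_true, Bool.or_eq_true, beq_iff_eq, bne_iff_ne, ne_eq,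
    decide_eq_true_eq]
  split_ifs <;> omega

-- A's guarded count over any pair list equals the sum of the three category counts.
theorem pv_count_split (row1 col1 : Int) (l : List (Int × Int)) :
    l.countP (fun p => decide (row1 ≠ p.1) && has_conflict row1 col1 p.1 p.2)
      = l.countP (fun p => p.1 != row1 && p.2 == col1)
        + l.countP (fun p => p.1 != row1 && p.1 - p.2 == row1 - col1)
        + l.countP (fun p => p.1 != row1 && p.1 + p.2 == row1 + col1) := by
  induction l with
  | nil => simp
  | cons p l ih =>
    have hp := pv_pointwise row1 col1 p
    simp only [List.countP_cons]
    omega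

-- ===== VERDICT (by name: the statement is the Claim_ definition above) =====
theorem get_num_conflict_at_square_spec : Claim_equal_get_num_conflict_at_square := by
  intro row1 col1 solution _
  unfold Spec_get_num_conflict_at_square get_num_conflict_at_square get_num_conflict_at_square_alt
  rw [PySem.List.enumerate_eq_map_pyRange (d := 0)]
  have hfun : (fun (acc j : Int) =>
        if row1 ≠ j then
          if has_conflict row1 col1 j (PySem.List.pyGetD solution j 0) = true then acc + 1 else acc
        else acc)
      = (fun (acc j : Int) =>
        if (decide (row1 ≠ j) && has_conflict row1 col1 j (PySem.List.pyGetD solution j 0)) = true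
        then acc + 1 else acc) := by
    funext acc j; by_cases h : row1 = j <;> simp [h]
  rw [hfun]
  rw [PySem.List.foldl_if_add_one]

  have hcomp : (fun j : Int =>
        decide (row1 ≠ j) && has_conflict row1 col1 j (PySem.List.pyGetD solution j 0))
      = (fun p : Int × Int => decide (row1 ≠ p.1) && has_conflict row1 col1 p.1 p.2) ∘
          (fun j => (j, PySem.List.pyGetD solution j 0)) := rfl
  rw [hcomp, ← List.countP_map, pv_count_split row1 col1]
  simp only [PySem.List.len_eq]
  push_cast
  ring
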